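-- pv_equiv track=rewrite | github.com/s17kf/aoc-2024 | common/common.py | get_list_of_groups_divided_empty_line
-- ===== SOURCE A (Python) =====
-- def is_empty(array):
--     return len(array) == 0
--
-- def get_list_of_groups_divided_empty_line(lines, delimiter=" "):
--     groups = []
--     last_group = ""
--
--     for line in lines:
--         if is_empty(line):
--             groups.append(last_group.lstrip(delimiter))
--             last_group = ""
--             continue
--         last_group += delimiter + line
--     if last_group != "":
--         groups.append(last_group.lstrip(delimiter))
--     return groups
-- ===== SOURCE B (Python) =====
-- def get_list_of_groups_divided_empty_line(lines, delimiter=" "):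
--     groups = []
--     rest = lines
--     while "" in rest:
--         b = rest.index("")
--         groups.append(delimiter.join(rest[:b]).lstrip(delimiter))
--         rest = rest[b + 1:]
--     if rest:
--         groups.append(delimiter.join(rest).lstrip(delimiter))
--     return groups
-- ===== Notes on version B (the rewrite author's own statement) =====
-- stated objective: alternative
-- what changed: Instead of A's single pass that string-accumulates 'delimiter+line' per line, B repeatedly finds the next empty line with list index, slices out the segment, and emits delimiter.join(segment).lstrip(delimiter) per segment.
import Mathlib
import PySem

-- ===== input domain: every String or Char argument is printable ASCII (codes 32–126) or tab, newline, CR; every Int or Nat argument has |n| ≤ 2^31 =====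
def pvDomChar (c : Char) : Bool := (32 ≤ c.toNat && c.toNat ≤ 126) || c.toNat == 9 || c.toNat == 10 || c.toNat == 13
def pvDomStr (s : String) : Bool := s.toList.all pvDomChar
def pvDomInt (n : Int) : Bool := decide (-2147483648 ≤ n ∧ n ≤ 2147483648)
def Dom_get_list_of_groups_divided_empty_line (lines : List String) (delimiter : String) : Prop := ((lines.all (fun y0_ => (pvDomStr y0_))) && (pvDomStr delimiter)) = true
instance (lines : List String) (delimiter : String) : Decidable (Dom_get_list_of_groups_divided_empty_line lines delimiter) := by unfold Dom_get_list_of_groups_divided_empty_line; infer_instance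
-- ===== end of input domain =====

-- B re-implements A by find-next-empty-line / slice / join per group instead of A's per-line string accumulation; alternative decomposition, no speed claim.

-- ===== PORT A =====
-- s.lstrip(chars): drop leading characters that occur in chars (exact; chars = "" strips nothing, as in Python)
def pyLstrip (s chars : String) : String :=
  String.ofList (s.toList.dropWhile (fun c => chars.toList.contains c))

-- one iteration of A's for-loop over (groups, last_group); 'is_empty(line)' is len(line)==0, i.e. line = ""
def aStep (delimiter : String) (st : List String × String) (line : String) : List String × String :=
  if line = "" then (st.1 ++ [pyLstrip st.2 delimiter], "")
  else (st.1, st.2 ++ (delimiter ++ line))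

def get_list_of_groups_divided_empty_line (lines : List String) (delimiter : String) : List String :=
  let st := lines.foldl (aStep delimiter) ([], "")
  if st.2 ≠ "" then st.1 ++ [pyLstrip st.2 delimiter] else st.1

-- ===== PORT B =====
-- termination helper for B's while loop: rest[b+1:] is strictly shorter
theorem pvSliceLenLt (rest : List String) (b : Nat) (h : PySem.List.index? rest "" = some b) :
    (PySem.List.slice rest (some ((b : Int) + 1)) none).length < rest.length := by
  obtain ⟨hk, -⟩ := PySem.List.getElem_of_index?_eq_some h
  have e : ((b : Int) + 1) = ((b + 1 : Nat) : Int) := by push_cast; ring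
  rw [e, PySem.List.slice_from_natCast]
  simp only [List.length_drop]
  omega

-- B's while loop: '"" in rest' and 'rest.index("")' are ported together as one match on index? (some b ↔ membership, b the first index)
def bLoop (delimiter : String) (groups rest : List String) : List String :=
  match h : PySem.List.index? rest "" with
  | some b =>
      bLoop delimiter
        (groups ++ [pyLstrip (PySem.Str.join delimiter (PySem.List.slice rest none (some (b : Int)))) delimiter])
        (PySem.List.slice rest (some ((b : Int) + 1)) none)
  | none =>
      if rest ≠ [] then groups ++ [pyLstrip (PySem.Str.join delimiter rest) delimiter] else groups
termination_by rest.length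
decreasing_by exact pvSliceLenLt rest b h

def get_list_of_groups_divided_empty_line_alt (lines : List String) (delimiter : String) : List String :=
  bLoop delimiter [] lines

-- ===== PRECONDITION & SPEC =====
def Spec_get_list_of_groups_divided_empty_line (lines : List String) (delimiter : String) (out : List String) : Prop := out = get_list_of_groups_divided_empty_line_alt lines delimiter
instance (lines : List String) (delimiter : String) (out : List String) : Decidable (Spec_get_list_of_groups_divided_empty_line lines delimiter out) := by unfold Spec_get_list_of_groups_divided_empty_line; infer_instance

-- ===== CLAIM (what is proved, stated in full; the proofs are below) =====
def Claim_equal_get_list_of_groups_divided_empty_line : Prop := ∀ (lines : List String) (delimiter : String), Dom_get_list_of_groups_divided_empty_line lines delimiter → Spec_get_list_of_groups_divided_empty_line lines delimiter (get_list_of_groups_divided_empty_line lines delimiter)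

-- ===== LEMMAS AND PROOFS =====

-- A's accumulator after a run of non-empty lines
def aCat (delimiter : String) (acc : String) (ls : List String) : String :=
  ls.foldl (fun a l => a ++ (delimiter ++ l)) acc

theorem foldl_aStep_no_empty (d : String) (ls : List String) (h : "" ∉ ls) :
    ∀ gs acc, ls.foldl (aStep d) (gs, acc) = (gs, aCat d acc ls) := by
  induction ls with
  | nil => intro gs acc; rfl
  | cons l ls ih =>
      intro gs acc
      have hl : l ≠ "" := fun he => h (he ▸ List.mem_cons_self)
      have hm : "" ∉ ls := fun hm => h (List.mem_cons_of_mem _ hm)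
      simp only [List.foldl_cons, aStep, if_neg hl, aCat, ih hm]

theorem foldl_aStep_prefix (d : String) (ls : List String) :
    ∀ gs acc, ls.foldl (aStep d) (gs, acc) =
      ((gs ++ (ls.foldl (aStep d) ([], acc)).1, (ls.foldl (aStep d) ([], acc)).2)) := by
  induction ls with
  | nil => intro gs acc; simp
  | cons l ls ih =>
      intro gs acc
      by_cases hl : l = ""
      · subst hl
        simp only [List.foldl_cons, aStep, reduceIte]
        rw [ih (gs ++ [pyLstrip acc d]) "", ih ([] ++ [pyLstrip acc d]) ""]
        simp
      · simp only [List.foldl_cons, aStep, if_neg hl]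
        exact ih gs _

theorem join_single (d l : String) : PySem.Str.join d [l] = l := by
  rw [← String.toList_inj]
  simp [PySem.Str.toList_join, PySem.Chars.join_singleton]

theorem join_cons (d l : String) (ls : List String) (h : ls ≠ []) :
    PySem.Str.join d (l :: ls) = l ++ d ++ PySem.Str.join d ls := by
  obtain ⟨y, ys, rfl⟩ := List.exists_cons_of_ne_nil h
  rw [← String.toList_inj]
  simp [PySem.Str.toList_join, PySem.Chars.join_cons_cons, String.toList_append]

theorem aCat_eq_join (d : String) : ∀ (ls : List String), ls ≠ [] →
    ∀ acc, aCat d acc ls = acc ++ (d ++ PySem.Str.join d ls) := by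
  intro ls
  induction ls with
  | nil => intro h; exact absurd rfl h
  | cons l ls ih =>
      intro _ acc
      cases ls with
      | nil =>
          rw [join_single]
          simp only [aCat, List.foldl_cons, List.foldl_nil]
      | cons m ms =>
          have hne : (m :: ms) ≠ [] := by simp
          have hstep : aCat d acc (l :: m :: ms) = aCat d (acc ++ (d ++ l)) (m :: ms) := rfl
          rw [hstep, ih hne (acc ++ (d ++ l)), join_cons d l (m :: ms) hne]
          rw [← String.toList_inj]
          simp [String.toList_append]

-- stripping a delimiter-prefixed string equals stripping the string itself
theorem pyLstrip_delim_prefix (d s : String) : pyLstrip (d ++ s) d = pyLstrip s d := by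
  unfold pyLstrip
  congr 1
  rw [String.toList_append, List.dropWhile_append]
  have h : (d.toList.dropWhile (fun c => d.toList.contains c)) = [] :=
    List.dropWhile_eq_nil_iff.mpr (fun x hx => by simpa using hx)
  rw [h]
  simp

theorem pyLstrip_acat (d : String) (ls : List String) :
    pyLstrip (aCat d "" ls) d = pyLstrip (PySem.Str.join d ls) d := by
  cases ls with
  | nil => rfl
  | cons l ls =>
      rw [aCat_eq_join d (l :: ls) (by simp) ""]
      have e : ("" : String) ++ (d ++ PySem.Str.join d (l :: ls)) = d ++ PySem.Str.join d (l :: ls) := by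
        rw [← String.toList_inj]; simp [String.toList_append]
      rw [e]
      exact pyLstrip_delim_prefix _ _

theorem aCat_toList_len (d : String) : ∀ (ls : List String) (acc : String),
    acc.toList.length ≤ (aCat d acc ls).toList.length := by
  intro ls
  induction ls with
  | nil => intro acc; simp [aCat]
  | cons l ls ih =>
      intro acc
      have hstep : aCat d acc (l :: ls) = aCat d (acc ++ (d ++ l)) ls := rfl
      rw [hstep]
      calc acc.toList.length ≤ (acc ++ (d ++ l)).toList.length := by
            simp [String.toList_append]
        _ ≤ _ := ih _

theorem aCat_cons_ne (d l : String) (ls : List String) (hl : l ≠ "") :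
    aCat d "" (l :: ls) ≠ "" := by
  intro h
  have h1 := aCat_toList_len d ls (("" : String) ++ (d ++ l))
  have h2 : aCat d "" (l :: ls) = aCat d (("" : String) ++ (d ++ l)) ls := rfl
  rw [← h2, h] at h1
  have hlen : ((("" : String) ++ (d ++ l)).toList).length = d.toList.length + l.toList.length := by
    simp [String.toList_append]
  have hz : (("" : String).toList).length = 0 := by simp
  rw [hlen, hz] at h1
  exact hl (String.toList_eq_nil_iff.mp (List.length_eq_zero_iff.mp (by omega)))

-- unfolding lemmas for B's loop
theorem bLoop_cons (d : String) (gs rest : List String) (b : Nat)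
    (h : PySem.List.index? rest "" = some b) :
    bLoop d gs rest =
      bLoop d (gs ++ [pyLstrip (PySem.Str.join d (PySem.List.slice rest none (some (b : Int)))) d])
        (PySem.List.slice rest (some ((b : Int) + 1)) none) := by
  rw [bLoop.eq_def]
  split
  · rename_i b' h'
    rw [h] at h'
    injection h' with e
    subst e
    rfl
  · rename_i h'
    rw [h] at h'
    cases h'

theorem bLoop_none (d : String) (gs rest : List String)
    (h : PySem.List.index? rest "" = none) :
    bLoop d gs rest = if rest ≠ [] then gs ++ [pyLstrip (PySem.Str.join d rest) d] else gs := by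
  rw [bLoop.eq_def]
  split
  · rename_i b' h'
    rw [h] at h'
    cases h'
  · rfl

theorem bLoop_prefix (d : String) : ∀ (n : Nat) (rest : List String), rest.length = n →
    ∀ gs, bLoop d gs rest = gs ++ bLoop d [] rest := by
  intro n
  induction n using Nat.strong_induction_on with
  | _ n ih =>
    intro rest hn gs
    cases h : PySem.List.index? rest "" with
    | some b =>
        rw [bLoop_cons d gs rest b h, bLoop_cons d [] rest b h]
        have hlt : (PySem.List.slice rest (some ((b : Int) + 1)) none).length < n :=
          hn ▸ pvSliceLenLt rest b h
        have h1 := ih _ hlt _ rfl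
        rw [h1 (gs ++ [pyLstrip (PySem.Str.join d (PySem.List.slice rest none (some (b : Int)))) d]),
            h1 ([] ++ [pyLstrip (PySem.Str.join d (PySem.List.slice rest none (some (b : Int)))) d])]
        simp
    | none =>
        rw [bLoop_none d gs rest h, bLoop_none d [] rest h]
        split_ifs <;> simp

theorem main_eq (d : String) : ∀ (n : Nat) (lines : List String), lines.length = n →
    get_list_of_groups_divided_empty_line lines d = bLoop d [] lines := by
  intro n
  induction n using Nat.strong_induction_on with
  | _ n ih =>
    intro lines hn
    cases h : PySem.List.index? lines "" with
    | none =>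
        have hmem : "" ∉ lines := (PySem.List.index?_eq_none_iff lines "").mp h
        rw [bLoop_none d [] lines h]
        simp only [get_list_of_groups_divided_empty_line]
        rw [foldl_aStep_no_empty d lines hmem [] ""]
        cases lines with
        | nil => simp [aCat]
        | cons l ls =>
            have hl : l ≠ "" := fun he => hmem (he ▸ List.mem_cons_self)
            have hne := aCat_cons_ne d l ls hl
            simp only [ne_eq]
            rw [if_pos (by simpa using hne), if_pos (by simp)]
            simp only [List.nil_append]
            rw [pyLstrip_acat]
    | some b =>
        obtain ⟨pre, suf, hsplit, hlen, hpre⟩ := (PySem.List.index?_eq_some_iff lines "" b).mp h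
        subst hsplit
        rw [bLoop_cons d [] _ b h]
        have e1 : PySem.List.slice (pre ++ "" :: suf) none (some (b : Int)) = pre := by
          rw [PySem.List.slice_to_natCast, ← hlen, List.take_left]
        have e2 : PySem.List.slice (pre ++ "" :: suf) (some ((b : Int) + 1)) none = suf := by
          have e : ((b : Int) + 1) = ((b + 1 : Nat) : Int) := by push_cast; ring
          rw [e, PySem.List.slice_from_natCast, ← hlen]
          rw [show pre ++ "" :: suf = (pre ++ [""]) ++ suf by simp]
          rw [show pre.length + 1 = (pre ++ [""]).length by simp]
          exact List.drop_left
        rw [e1, e2]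
        have hA : get_list_of_groups_divided_empty_line (pre ++ "" :: suf) d
            = pyLstrip (aCat d "" pre) d :: get_list_of_groups_divided_empty_line suf d := by
          simp only [get_list_of_groups_divided_empty_line]
          rw [List.foldl_append, foldl_aStep_no_empty d pre hpre [] "", List.foldl_cons]
          simp only [aStep, reduceIte]
          rw [foldl_aStep_prefix d suf ([] ++ [pyLstrip (aCat d "" pre) d]) ""]
          by_cases hs : (suf.foldl (aStep d) ([], "")).2 = "" <;> simp [hs]
        rw [hA]
        have hlt : suf.length < n := by
          rw [← hn]; simp only [List.length_append, List.length_cons]; omega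
        rw [ih suf.length hlt suf rfl]
        rw [bLoop_prefix d suf.length suf rfl ([] ++ [pyLstrip (PySem.Str.join d pre) d])]
        rw [pyLstrip_acat]
        simp

-- ===== VERDICT (by name: the statement is the Claim_ definition above) =====
theorem get_list_of_groups_divided_empty_line_spec : Claim_equal_get_list_of_groups_divided_empty_line := by
  intro lines delimiter _
  unfold Spec_get_list_of_groups_divided_empty_line get_list_of_groups_divided_empty_line_alt
  exact main_eq delimiter lines.length lines rfl
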